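-- pv_equiv track=rewrite | github.com/AuroraGiggleFairy/AuroraGiggleFairy.github.io | _DLL-Projects/Support_DeecorationBlockPlusFiles/generate_doorsecure_agf_fresh.py | split_main_color
-- ===== SOURCE A (Python) =====
-- COLORS = [
--     'Blue', 'Brown', 'Green', 'Grey', 'Orange', 'Pink', 'Purple', 'Red', 'White', 'Yellow', 'Oak'
-- ]
--
-- def split_main_color(name):
--     for color in sorted(COLORS, key=len, reverse=True):
--         if name.endswith('AGFWood'+color):
--             return (name[:-len('AGFWood'+color)], 'Wood'+color)
--         if name.endswith('AGFIron'+color):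
--             return (name[:-len('AGFIron'+color)], 'Iron'+color)
--         if name.endswith('AGFSteel'+color):
--             return (name[:-len('AGFSteel'+color)], 'Steel'+color)
--         if name.endswith(color):
--             return (name[:-len(color)], color)
--     return (name, '')
-- ===== SOURCE B (Python) =====
-- COLORS = [
--     'Blue', 'Brown', 'Green', 'Grey', 'Orange', 'Pink', 'Purple', 'Red', 'White', 'Yellow', 'Oak'
-- ]
--
-- def split_main_color(name):
--     # Phase 1: find the color suffix (colors are mutually non-suffix, so at most one matches).
--     color = next((c for c in COLORS if name.endswith(c)), None)
--     if color is None: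
--         return (name, '')
--     # Phase 2: inspect the material tag in front of the color.
--     prefix = name[:-len(color)]
--     if prefix.endswith('AGFWood'):
--         return (prefix[:-7], 'Wood' + color)
--     if prefix.endswith('AGFIron'):
--         return (prefix[:-7], 'Iron' + color)
--     if prefix.endswith('AGFSteel'):
--         return (prefix[:-8], 'Steel' + color)
--     return (prefix, color)
-- ===== Notes on version B (the rewrite author's own statement) =====
-- stated objective: alternative
-- what changed: A makes one combined scan over the length-sorted color list testing four material+color suffixes per color; B first finds the unique color suffix in one scan, slices it off, and then decides the material by inspecting the tail of the remaining prefix.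
import Mathlib
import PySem

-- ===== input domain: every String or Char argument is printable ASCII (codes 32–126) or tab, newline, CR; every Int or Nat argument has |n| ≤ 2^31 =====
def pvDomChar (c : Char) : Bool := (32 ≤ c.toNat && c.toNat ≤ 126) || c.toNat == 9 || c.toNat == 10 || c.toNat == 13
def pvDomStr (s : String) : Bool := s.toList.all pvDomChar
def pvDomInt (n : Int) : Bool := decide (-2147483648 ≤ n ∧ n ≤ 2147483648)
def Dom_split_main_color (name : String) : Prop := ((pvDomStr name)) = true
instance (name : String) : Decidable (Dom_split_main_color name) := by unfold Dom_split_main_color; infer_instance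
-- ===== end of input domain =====

-- B replaces A's single combined scan (four material+color suffix tests per length-sorted
-- color) by two phases: find the unique color suffix, then classify the material on the
-- remaining prefix; same cost, different decomposition.

-- ===== PORT A =====
def pvColors : List String :=
  ["Blue", "Brown", "Green", "Grey", "Orange", "Pink", "Purple", "Red", "White", "Yellow", "Oak"]

def pvLoopA (name : String) : List String → String × String
  | [] => (name, "")
  | c :: rest =>
    if PySem.Str.endswith name ("AGFWood" ++ c) then
      (PySem.Str.slice name none (some (-(PySem.Str.len ("AGFWood" ++ c)))), "Wood" ++ c)
    else if PySem.Str.endswith name ("AGFIron" ++ c) then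
      (PySem.Str.slice name none (some (-(PySem.Str.len ("AGFIron" ++ c)))), "Iron" ++ c)
    else if PySem.Str.endswith name ("AGFSteel" ++ c) then
      (PySem.Str.slice name none (some (-(PySem.Str.len ("AGFSteel" ++ c)))), "Steel" ++ c)
    else if PySem.Str.endswith name c then
      (PySem.Str.slice name none (some (-(PySem.Str.len c))), c)
    else pvLoopA name rest

def split_main_color (name : String) : String × String :=
  pvLoopA name (PySem.List.sorted pvColors (fun c => PySem.Str.len c) true)

-- ===== PORT B =====
def split_main_color_alt (name : String) : String × String :=
  match pvColors.find? (fun c => PySem.Str.endswith name c) with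
  | none => (name, "")
  | some c =>
    let pre := PySem.Str.slice name none (some (-(PySem.Str.len c)))
    if PySem.Str.endswith pre "AGFWood" then
      (PySem.Str.slice pre none (some (-7)), "Wood" ++ c)
    else if PySem.Str.endswith pre "AGFIron" then
      (PySem.Str.slice pre none (some (-7)), "Iron" ++ c)
    else if PySem.Str.endswith pre "AGFSteel" then
      (PySem.Str.slice pre none (some (-8)), "Steel" ++ c)
    else (pre, c)

-- ===== PRECONDITION & SPEC =====
def Spec_split_main_color (name : String) (out : String × String) : Prop := out = split_main_color_alt name
instance (name : String) (out : String × String) : Decidable (Spec_split_main_color name out) := by unfold Spec_split_main_color; infer_instance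

-- ===== CLAIM (what is proved, stated in full; the proofs are below) =====
def Claim_equal_split_main_color : Prop := ∀ (name : String), Dom_split_main_color name → Spec_split_main_color name (split_main_color name)

-- ===== LEMMAS AND PROOFS =====

-- a material test succeeds only if the bare color test does
theorem pv_material_imp (name p c : String)
    (h : PySem.Str.endswith name (p ++ c) = true) : PySem.Str.endswith name c = true := by
  rw [PySem.Str.endswith_eq, PySem.Chars.endswith_iff] at h ⊢
  refine List.IsSuffix.trans ?_ h
  simp [String.toList_append]

-- no color is a suffix of a different color (checked over the 11×11 pairs)
theorem pv_no_suffix_pair :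
    ∀ c ∈ pvColors, ∀ c' ∈ pvColors, PySem.Str.endswith c' c = true → c = c' := by
  decide

-- at most one color is a suffix of name
theorem pv_unique (name : String) :
    ∀ c ∈ pvColors, ∀ c' ∈ pvColors,
      PySem.Str.endswith name c = true → PySem.Str.endswith name c' = true → c = c' := by
  intro c hc c' hc' h h'
  rw [PySem.Str.endswith_eq, PySem.Chars.endswith_iff] at h h'
  rcases List.suffix_or_suffix_of_suffix h h' with hs | hs
  · exact pv_no_suffix_pair c hc c' hc'
      (by rw [PySem.Str.endswith_eq, PySem.Chars.endswith_iff]; exact hs)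
  · exact (pv_no_suffix_pair c' hc' c hc
      (by rw [PySem.Str.endswith_eq, PySem.Chars.endswith_iff]; exact hs)).symm

theorem pv_find?_some {α : Type} (P : α → Bool) (c : α) :
    ∀ (cs : List α), c ∈ cs → P c = true →
      (∀ c' ∈ cs, P c' = true → c' = c) → cs.find? P = some c := by
  intro cs
  induction cs with
  | nil => intro h; cases h
  | cons a t ih =>
    intro hc hP huniq
    by_cases ha : P a = true
    · have : a = c := huniq a (List.mem_cons_self ..) ha
      subst this; simp [List.find?, ha]
    · have hac : a ≠ c := fun h => ha (h ▸ hP)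
      have hct : c ∈ t := by
        rcases List.mem_cons.mp hc with h | h
        · exact absurd h.symm hac
        · exact h
      simp only [List.find?, Bool.eq_false_iff.mpr ha]
      simpa using ih hct hP (fun c' h' => huniq c' (List.mem_cons_of_mem _ h'))

theorem pv_loopA_none (name : String) :
    ∀ (cs : List String), (∀ c ∈ cs, PySem.Str.endswith name c = false) →
      pvLoopA name cs = (name, "") := by
  intro cs
  induction cs with
  | nil => intro _; rfl
  | cons a t ih =>
    intro h
    have ha : PySem.Str.endswith name a = false := h a (List.mem_cons_self ..)
    have hw : PySem.Str.endswith name ("AGFWood" ++ a) = false := by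
      cases hx : PySem.Str.endswith name ("AGFWood" ++ a) with
      | false => rfl
      | true => exact absurd (pv_material_imp name _ a hx) (by rw [ha]; exact Bool.false_ne_true)
    have hi : PySem.Str.endswith name ("AGFIron" ++ a) = false := by
      cases hx : PySem.Str.endswith name ("AGFIron" ++ a) with
      | false => rfl
      | true => exact absurd (pv_material_imp name _ a hx) (by rw [ha]; exact Bool.false_ne_true)
    have hs : PySem.Str.endswith name ("AGFSteel" ++ a) = false := by
      cases hx : PySem.Str.endswith name ("AGFSteel" ++ a) with
      | false => rfl
      | true => exact absurd (pv_material_imp name _ a hx) (by rw [ha]; exact Bool.false_ne_true)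
    simp only [pvLoopA, hw, hi, hs, ha, Bool.false_eq_true, if_false]
    exact ih (fun c hc => h c (List.mem_cons_of_mem _ hc))

-- the body A executes when it reaches the (unique) matching color
def pvStepA (name c : String) : String × String :=
  if PySem.Str.endswith name ("AGFWood" ++ c) then
    (PySem.Str.slice name none (some (-(PySem.Str.len ("AGFWood" ++ c)))), "Wood" ++ c)
  else if PySem.Str.endswith name ("AGFIron" ++ c) then
    (PySem.Str.slice name none (some (-(PySem.Str.len ("AGFIron" ++ c)))), "Iron" ++ c)
  else if PySem.Str.endswith name ("AGFSteel" ++ c) then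
    (PySem.Str.slice name none (some (-(PySem.Str.len ("AGFSteel" ++ c)))), "Steel" ++ c)
  else (PySem.Str.slice name none (some (-(PySem.Str.len c))), c)

theorem pv_loopA_hit (name c : String) (hP : PySem.Str.endswith name c = true) :
    ∀ (cs : List String), c ∈ cs →
      (∀ c' ∈ cs, PySem.Str.endswith name c' = true → c' = c) →
      pvLoopA name cs = pvStepA name c := by
  intro cs
  induction cs with
  | nil => intro h; cases h
  | cons a t ih =>
    intro hc huniq
    by_cases hac : a = c
    · subst hac
      simp only [pvLoopA, pvStepA, hP, if_true]
    · have ha : PySem.Str.endswith name a = false := by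
        cases hx : PySem.Str.endswith name a with
        | false => rfl
        | true => exact absurd (huniq a (List.mem_cons_self ..) hx) hac
      have hw : PySem.Str.endswith name ("AGFWood" ++ a) = false := by
        cases hx : PySem.Str.endswith name ("AGFWood" ++ a) with
        | false => rfl
        | true => exact absurd (pv_material_imp name _ a hx) (by rw [ha]; exact Bool.false_ne_true)
      have hi : PySem.Str.endswith name ("AGFIron" ++ a) = false := by
        cases hx : PySem.Str.endswith name ("AGFIron" ++ a) with
        | false => rfl
        | true => exact absurd (pv_material_imp name _ a hx) (by rw [ha]; exact Bool.false_ne_true)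
      have hs : PySem.Str.endswith name ("AGFSteel" ++ a) = false := by
        cases hx : PySem.Str.endswith name ("AGFSteel" ++ a) with
        | false => rfl
        | true => exact absurd (pv_material_imp name _ a hx) (by rw [ha]; exact Bool.false_ne_true)
      simp only [pvLoopA, hw, hi, hs, ha, Bool.false_eq_true, if_false]
      have hct : c ∈ t := by
        rcases List.mem_cons.mp hc with h | h
        · exact absurd h.symm hac
        · exact h
      exact ih hct (fun c' h' => huniq c' (List.mem_cons_of_mem _ h'))

theorem pv_suffix_cancel (w cl m : List Char) : (w ++ cl) <:+ (m ++ cl) ↔ w <:+ m := by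
  constructor
  · rintro ⟨t, ht⟩
    rw [← List.append_assoc] at ht
    exact ⟨t, List.append_cancel_right ht⟩
  · rintro ⟨t, ht⟩
    exact ⟨t, by rw [← List.append_assoc, ht]⟩

theorem pv_endswith_shift (name p c pre : String) (m : List Char)
    (hm : m ++ c.toList = name.toList) (hpre : pre.toList = m) :
    PySem.Str.endswith name (p ++ c) = PySem.Str.endswith pre p := by
  rw [PySem.Str.endswith_eq, PySem.Str.endswith_eq, hpre, ← hm, String.toList_append]
  rw [Bool.eq_iff_iff, PySem.Chars.endswith_iff, PySem.Chars.endswith_iff]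
  exact pv_suffix_cancel p.toList c.toList m

theorem pv_slice_neg (name : String) (k : Nat) (hk : 0 < k) :
    (PySem.Str.slice name none (some (-(k : Int)))).toList
      = name.toList.take (name.toList.length - k) := by
  rw [PySem.Str.toList_slice, PySem.Chars.slice_eq_listSlice,
    PySem.List.slice_to_neg_natCast _ k hk]

theorem pv_slice_shift (name c pre w : String) (m : List Char)
    (hm : m ++ c.toList = name.toList) (hpre : pre.toList = m)
    (k : Nat) (hk : 1 < k) (hw : w.toList.length = k) :
    PySem.Str.slice name none (some (-(PySem.Str.len (w ++ c))))
      = PySem.Str.slice pre none (some (-(OfNat.ofNat k : Int))) := by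
  apply String.toList_inj.mp
  have hlen : PySem.Str.len (w ++ c) = ((w.toList.length + c.toList.length : Nat) : Int) := by
    rw [PySem.Str.len_eq, String.toList_append, List.length_append]
  have hpos : 0 < w.toList.length + c.toList.length := by omega
  rw [hlen, pv_slice_neg name _ hpos, PySem.Str.toList_slice, PySem.Chars.slice_eq_listSlice,
    PySem.List.slice_to_neg_ofNat _ k hk, hpre, ← hm, List.length_append, hw]
  rw [show m.length + c.toList.length - (k + c.toList.length) = m.length - k by omega]
  exact List.take_append_of_le_length (by omega)

set_option maxHeartbeats 1000000 in
theorem pv_step_eq (name c : String) (hne : c.toList ≠ [])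
    (hP : PySem.Str.endswith name c = true) :
    pvStepA name c =
      (if PySem.Str.endswith (PySem.Str.slice name none (some (-(PySem.Str.len c)))) "AGFWood" then
         (PySem.Str.slice (PySem.Str.slice name none (some (-(PySem.Str.len c)))) none (some (-7)), "Wood" ++ c)
       else if PySem.Str.endswith (PySem.Str.slice name none (some (-(PySem.Str.len c)))) "AGFIron" then
         (PySem.Str.slice (PySem.Str.slice name none (some (-(PySem.Str.len c)))) none (some (-7)), "Iron" ++ c)
       else if PySem.Str.endswith (PySem.Str.slice name none (some (-(PySem.Str.len c)))) "AGFSteel" then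
         (PySem.Str.slice (PySem.Str.slice name none (some (-(PySem.Str.len c)))) none (some (-8)), "Steel" ++ c)
       else (PySem.Str.slice name none (some (-(PySem.Str.len c))), c)) := by
  have hm' := hP
  rw [PySem.Str.endswith_eq, PySem.Chars.endswith_iff] at hm'
  obtain ⟨m, hm⟩ := hm'
  have hclen : 0 < c.toList.length := by
    cases h : c.toList with
    | nil => exact absurd h hne
    | cons a t => simp [h]
  set pre := PySem.Str.slice name none (some (-(PySem.Str.len c))) with hpredef
  have hpre : pre.toList = m := by
    rw [hpredef, PySem.Str.len_eq, pv_slice_neg name _ hclen, ← hm,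
      List.length_append, Nat.add_sub_cancel, List.take_left]
  have hW := pv_endswith_shift name "AGFWood" c pre m hm hpre
  have hI := pv_endswith_shift name "AGFIron" c pre m hm hpre
  have hS := pv_endswith_shift name "AGFSteel" c pre m hm hpre
  show pvStepA name c = _
  unfold pvStepA
  rw [hW, hI, hS]
  split_ifs with h1 h2 h3
  · exact congrArg (fun x => (x, "Wood" ++ c))
      (pv_slice_shift name c pre "AGFWood" m hm hpre 7 (by omega) (by decide))
  · exact congrArg (fun x => (x, "Iron" ++ c))
      (pv_slice_shift name c pre "AGFIron" m hm hpre 7 (by omega) (by decide))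
  · exact congrArg (fun x => (x, "Steel" ++ c))
      (pv_slice_shift name c pre "AGFSteel" m hm hpre 8 (by omega) (by decide))
  · rfl

-- ===== VERDICT (by name: the statement is the Claim_ definition above) =====
theorem split_main_color_spec : Claim_equal_split_main_color := by
  intro name _
  unfold Spec_split_main_color split_main_color split_main_color_alt
  by_cases hex : ∃ c ∈ pvColors, PySem.Str.endswith name c = true
  · obtain ⟨c, hc, hP⟩ := hex
    have huniq : ∀ c' ∈ pvColors, PySem.Str.endswith name c' = true → c' = c :=
      fun c' hc' h' => pv_unique name c' hc' c hc h' hP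
    rw [pv_find?_some _ c pvColors hc hP huniq]
    have hmem : c ∈ PySem.List.sorted pvColors (fun c => PySem.Str.len c) true :=
      (PySem.List.mem_sorted ..).mpr hc
    have huniq' : ∀ c' ∈ PySem.List.sorted pvColors (fun c => PySem.Str.len c) true,
        PySem.Str.endswith name c' = true → c' = c :=
      fun c' hc' h' => huniq c' ((PySem.List.mem_sorted ..).mp hc') h'
    rw [pv_loopA_hit name c hP _ hmem huniq']
    have hne : c.toList ≠ [] := by
      revert hc; unfold pvColors; intro hc; fin_cases hc <;> decide
    exact pv_step_eq name c hne hP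
  · push_neg at hex
    have hall : ∀ c ∈ pvColors, PySem.Str.endswith name c = false := by
      intro c hc
      cases h : PySem.Str.endswith name c with
      | false => rfl
      | true => exact absurd h (by simpa using hex c hc)
    rw [List.find?_eq_none.mpr (fun c hc => by rw [hall c hc]; simp)]
    exact pv_loopA_none name _ (fun c hc =>
      hall c ((PySem.List.mem_sorted ..).mp hc))
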